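-- pv_equiv track=rewrite | github.com/nicokroe/Advent-of-Code-2021 | day_11/day_11.py | add_one
-- ===== SOURCE A (Python) =====
-- def add_one(grid: list[list[int]]) -> bool:
--     flash = False
--     # Rows
--     for row in grid:
--         # Columns
--         for j in range(len(row)):
--             row[j] += 1
--             if row[j] == 10:
--                 flash = True
--     return flash
-- ===== SOURCE B (Python) =====
-- def add_one(grid: list[list[int]]) -> bool:
--     # Same in-place mutation as A (every cell incremented), but detection is
--     # a separate scan after the mutation pass instead of a fused flag update.
--     for row in grid:
--         for j in range(len(row)):
--             row[j] += 1
--     return any(cell == 10 for row in grid for cell in row)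
-- ===== Notes on version B (the rewrite author's own statement) =====
-- stated objective: alternative
-- what changed: Splits A's fused increment-and-detect loop into two passes: a pure mutation pass that increments every cell, then a separate generator-based scan that detects any cell equal to 10.
import Mathlib
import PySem

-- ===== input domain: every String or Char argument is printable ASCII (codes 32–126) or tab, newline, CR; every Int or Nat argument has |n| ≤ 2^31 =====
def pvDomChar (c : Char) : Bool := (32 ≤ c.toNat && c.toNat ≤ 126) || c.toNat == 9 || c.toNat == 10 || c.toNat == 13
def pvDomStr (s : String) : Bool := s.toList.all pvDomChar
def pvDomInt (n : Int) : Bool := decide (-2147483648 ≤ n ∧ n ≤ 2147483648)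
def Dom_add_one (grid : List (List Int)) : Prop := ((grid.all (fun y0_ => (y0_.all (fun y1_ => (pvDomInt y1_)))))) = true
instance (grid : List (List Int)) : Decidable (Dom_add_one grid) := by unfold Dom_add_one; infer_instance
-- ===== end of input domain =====

-- B splits A's fused increment-and-detect loop into a mutation pass then a separate scan;
-- both Pythons mutate the grid in place identically, the equivalence proved is about the return value.

-- ===== PORT A =====
-- inner column loop of A: for j in range(len(row)): row[j] += 1; if row[j] == 10: flash = True
def add_one_inner (row : List Int) (flash : Bool) : List Int × Bool :=
  (PySem.List.pyRange 0 row.length 1).foldl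
    (fun (st : List Int × Bool) j =>
      let row' := st.1.set j.toNat (PySem.List.pyGetD st.1 j 0 + 1)
      (row', if PySem.List.pyGetD row' j 0 = 10 then true else st.2))
    (row, flash)

def add_one (grid : List (List Int)) : Bool :=
  grid.foldl (fun flash row => (add_one_inner row flash).2) false

-- ===== PORT B =====
def add_one_alt (grid : List (List Int)) : Bool :=
  let grid' := grid.map (fun row => row.map (fun c => c + 1))
  grid'.any (fun row => row.any (fun c => c == 10))

-- ===== PRECONDITION & SPEC =====
def Spec_add_one (grid : List (List Int)) (out : Bool) : Prop := out = add_one_alt grid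
instance (grid : List (List Int)) (out : Bool) : Decidable (Spec_add_one grid out) := by unfold Spec_add_one; infer_instance

-- ===== CLAIM (what is proved, stated in full; the proofs are below) =====
def Claim_equal_add_one : Prop := ∀ (grid : List (List Int)), Dom_add_one grid → Spec_add_one grid (add_one grid)

-- ===== LEMMAS AND PROOFS =====

theorem add_one_inner_loop (suf pre : List Int) (flash : Bool) :
    (PySem.List.pyRange (pre.length : Int) ((pre.length : Int) + (suf.length : Int)) 1).foldl
      (fun (st : List Int × Bool) j =>
        let row' := st.1.set j.toNat (PySem.List.pyGetD st.1 j 0 + 1)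
        (row', if PySem.List.pyGetD row' j 0 = 10 then true else st.2))
      (pre ++ suf, flash)
    = (pre ++ suf.map (fun c => c + 1), flash || suf.any (fun c => decide (c + 1 = 10))) := by
  induction suf generalizing pre flash with
  | nil => simp [PySem.List.pyRange_one_eq_nil]
  | cons c rest ih =>
      rw [PySem.List.pyRange_one_cons (by simp)]
      simp only [List.foldl_cons]
      have hget : PySem.List.pyGetD (pre ++ c :: rest) (pre.length : Int) 0 = c := by
        simp [List.getD_eq_getElem?_getD]
      have hset : (pre ++ c :: rest).set (pre.length : Int).toNat
          (PySem.List.pyGetD (pre ++ c :: rest) (pre.length : Int) 0 + 1)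
          = pre ++ (c + 1) :: rest := by
        rw [hget]; simp
      have hget2 : PySem.List.pyGetD (pre ++ (c + 1) :: rest) (pre.length : Int) 0 = c + 1 := by
        simp [List.getD_eq_getElem?_getD]
      simp only [hset, hget2]
      have := ih (pre ++ [c + 1]) (if c + 1 = 10 then true else flash)
      simp only [List.length_append, List.length_singleton] at this
      rw [show ((pre.length : Int) + ((c :: rest).length : Int)) = ((pre.length + 1 : Nat) : Int) + (rest.length : Int) by simp; ring,
          show ((pre.length : Int) + 1) = ((pre.length + 1 : Nat) : Int) by push_cast; ring]
      simp only [List.append_assoc, List.singleton_append] at this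
      rw [this]
      simp only [List.map_cons, List.any_cons]
      congr 1
      by_cases h : c + 1 = 10 <;> simp [h]

theorem add_one_inner_eq (row : List Int) (flash : Bool) :
    add_one_inner row flash
      = (row.map (fun c => c + 1), flash || row.any (fun c => decide (c + 1 = 10))) := by
  have := add_one_inner_loop row [] flash
  simpa [add_one_inner] using this

theorem foldl_or_any (grid : List (List Int)) (b : Bool) :
    grid.foldl (fun flash row => flash || row.any (fun c => decide (c + 1 = 10))) b
      = (b || grid.any (fun row => row.any (fun c => decide (c + 1 = 10)))) := by
  induction grid generalizing b with
  | nil => simp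
  | cons r rs ih => rw [List.foldl_cons, ih, List.any_cons, Bool.or_assoc]

-- ===== VERDICT (by name: the statement is the Claim_ definition above) =====
theorem add_one_spec : Claim_equal_add_one := by
  intro grid _
  show add_one grid = add_one_alt grid
  unfold add_one add_one_alt
  simp only [add_one_inner_eq]
  rw [foldl_or_any grid false]
  simp [List.any_map, Function.comp_def, beq_eq_decide]
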